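-- pv_equiv track=rewrite | github.com/Nghia03092004/nghia03092004.github.io | project_euler/problem_426/solution.py | bbs_step
-- ===== SOURCE A (Python) =====
-- def bbs_step(config):
--     """Perform one step of the box-ball system."""
--     n = len(config)
--     new_config = [0] * n
--     carrier = 0
--     for i in range(n):
--         if config[i] == 1:
--             carrier += 1
--         elif carrier > 0:
--             new_config[i] = 1
--             carrier -= 1
--     return new_config
-- ===== SOURCE B (Python) =====
-- def bbs_step(config):
--     """Perform one step of the box-ball system.
--
--     Ball-to-box matching with two pointers instead of a carrier counter:
--     for each ball at i, a monotone pointer j finds the next free box to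
--     its right (skipping original ball positions); balls that run off the
--     right end are dropped, matching the discarded leftover carrier.
--     """
--     n = len(config)
--     new_config = [0] * n
--     j = 0
--     for i in range(n):
--         if config[i] == 1:
--             j = max(j, i + 1)
--             while j < n and config[j] == 1:
--                 j += 1
--             if j < n:
--                 new_config[j] = 1
--                 j += 1
--     return new_config
-- ===== Notes on version B (the rewrite author's own statement) =====
-- stated objective: alternative
-- what changed: Replaces A's per-box carrier counter with ball-to-box matching: for each ball a monotone second pointer scans right past original ball positions to the next free box and writes there (dropping balls that run off the end), so the decision per output cell is made by pointer placement rather than a decremented counter.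
import Mathlib
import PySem

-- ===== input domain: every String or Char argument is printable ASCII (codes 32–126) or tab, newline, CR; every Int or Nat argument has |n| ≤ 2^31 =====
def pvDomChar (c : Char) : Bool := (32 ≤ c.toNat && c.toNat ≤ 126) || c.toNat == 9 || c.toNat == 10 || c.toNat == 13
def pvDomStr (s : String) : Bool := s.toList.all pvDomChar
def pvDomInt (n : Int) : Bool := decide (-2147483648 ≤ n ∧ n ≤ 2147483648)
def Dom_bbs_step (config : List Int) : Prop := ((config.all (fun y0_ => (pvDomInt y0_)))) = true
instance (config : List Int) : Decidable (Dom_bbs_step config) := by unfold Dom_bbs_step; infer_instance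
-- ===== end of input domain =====

-- B replaces A's carrier counter with ball-to-box two-pointer matching: each ball
-- is placed by a monotone pointer into the next free box to its right; objective:
-- alternative (same O(n) cost, different control flow).

-- ===== PORT A =====
def bbs_step (config : List Int) : List Int :=
  let n : Nat := config.length
  let new_config : List Int := List.replicate n 0
  ((PySem.List.pyRange 0 (n : Int) 1).foldl
    (fun (st : List Int × Int) (i : Int) =>
      match PySem.List.pyGet? config i with
      | some v =>
        if v = 1 then (st.1, st.2 + 1)
        else if st.2 > 0 then (st.1.set i.toNat 1, st.2 - 1)
        else st
      | none => st)   -- unreachable: i ranges over 0 ≤ i < len(config)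
    (new_config, 0)).1

-- ===== PORT B =====
/-- The inner `while j < n and config[j] == 1: j += 1` loop of Source B. -/
def skipBalls (config : List Int) (j : Nat) : Nat :=
  if h : j < config.length then
    if config.getD j 0 = 1 then skipBalls config (j + 1) else j
  else j
termination_by config.length - j
decreasing_by omega

def bbs_step_alt (config : List Int) : List Int :=
  let n := config.length
  ((List.range n).foldl
    (fun (st : List Int × Nat) (i : Nat) =>
      if config.getD i 0 = 1 then
        let j := max st.2 (i + 1)
        let j := skipBalls config j
        if j < n then (st.1.set j 1, j + 1) else (st.1, j)
      else st)
    (List.replicate n 0, 0)).1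

-- ===== PRECONDITION & SPEC =====
def Spec_bbs_step (config : List Int) (out : List Int) : Prop := out = bbs_step_alt config
instance (config : List Int) (out : List Int) : Decidable (Spec_bbs_step config out) := by unfold Spec_bbs_step; infer_instance

-- ===== CLAIM (what is proved, stated in full; the proofs are below) =====
def Claim_equal_bbs_step : Prop := ∀ (config : List Int), Dom_bbs_step config → Spec_bbs_step config (bbs_step config)

-- ===== LEMMAS AND PROOFS =====

/-- Clean recursive reading of A's carrier loop. -/
def aGo : List Int → Int → List Int
  | [], _ => []
  | v :: xs, c =>
    if v = 1 then 0 :: aGo xs (c + 1)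
    else if c > 0 then 1 :: aGo xs (c - 1) else 0 :: aGo xs c

/-- Index of the first non-ball at position ≥ k in `rest` (its length if none). -/
def skipAux : List Int → Nat → Nat
  | [], _ => 0
  | v :: rest, 0 => if v = 1 then skipAux rest 0 + 1 else 0
  | _ :: rest, k + 1 => skipAux rest k + 1

/-- Clean recursive reading of B's two-pointer loop: `d` is the pointer's
distance ahead of the scan (clamped at 0). -/
def bGo : List Int → Nat → List Int
  | [], _ => []
  | v :: rest, d =>
    if v = 1 then
      let e := skipAux rest (d - 1)
      0 :: bGo rest (if e < rest.length then e + 1 else e)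
    else
      (if 0 < d then (1 : Int) else 0) :: bGo rest (d - 1)

/-- The window of already-decided cells: first `d` cells of `rest` marked
(1 on a box, 0 on a ball), zeros beyond. -/
def winArr (rest : List Int) (d : Nat) : List Int :=
  (rest.take d).map (fun v => if v = 1 then (0 : Int) else 1)
    ++ List.replicate (rest.length - d) 0

def cbN (l : List Int) : Nat := l.countP (fun v => !(v == 1))

lemma aGo_inv (config : List Int) :
    ∀ (rest pre acc : List Int) (c : Int),
      config = pre ++ rest → acc.length = pre.length →
      ((PySem.List.pyRange (pre.length : Int) (config.length : Int) 1).foldl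
        (fun (st : List Int × Int) (i : Int) =>
          match PySem.List.pyGet? config i with
          | some v =>
            if v = 1 then (st.1, st.2 + 1)
            else if st.2 > 0 then (st.1.set i.toNat 1, st.2 - 1)
            else st
          | none => st)
        (acc ++ List.replicate rest.length 0, c)).1 = acc ++ aGo rest c := by
  intro rest
  induction rest with
  | nil =>
    intro pre acc c hcfg hlen
    have hn : config.length = pre.length := by simp [hcfg]
    simp [hn, PySem.List.pyRange_one_eq_nil, aGo]
  | cons v xs ih =>
    intro pre acc c hcfg hlen
    have hlt : (pre.length : Int) < (config.length : Int) := by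
      simp [hcfg]
    rw [PySem.List.pyRange_one_cons hlt]
    have hget : PySem.List.pyGet? config (pre.length : Int) = some v := by
      rw [PySem.List.pyGet?_natCast]
      simp [hcfg]
    simp only [List.foldl_cons, hget]
    by_cases hv : v = 1
    · simp only [if_pos hv]
      have : acc ++ List.replicate (v :: xs).length 0
          = (acc ++ [0]) ++ List.replicate xs.length 0 := by
        simp [List.replicate_succ]
      rw [this]
      have h1 : ((pre ++ [v]).length : Int) = (pre.length : Int) + 1 := by simp
      have := ih (pre ++ [v]) (acc ++ [0]) (c + 1)
        (by simp [hcfg]) (by simp [hlen])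
      rw [h1] at this
      rw [this]
      simp [aGo, if_pos hv]
    · by_cases hc : c > 0
      · simp only [if_neg hv, if_pos hc]
        have hset : (acc ++ List.replicate (v :: xs).length 0).set
            ((pre.length : Int)).toNat 1
            = (acc ++ [1]) ++ List.replicate xs.length 0 := by
          simp [List.replicate_succ, hlen]
        rw [hset]
        have h1 : ((pre ++ [v]).length : Int) = (pre.length : Int) + 1 := by simp
        have := ih (pre ++ [v]) (acc ++ [1]) (c - 1)
          (by simp [hcfg]) (by simp [hlen])
        rw [h1] at this
        rw [this]
        simp [aGo, hv, hc]
      · simp only [if_neg hv, if_neg hc]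
        have : acc ++ List.replicate (v :: xs).length 0
            = (acc ++ [0]) ++ List.replicate xs.length 0 := by
          simp [List.replicate_succ]
        rw [this]
        have h1 : ((pre ++ [v]).length : Int) = (pre.length : Int) + 1 := by simp
        have := ih (pre ++ [v]) (acc ++ [0]) c
          (by simp [hcfg]) (by simp [hlen])
        rw [h1] at this
        rw [this]
        simp [aGo, hv, hc]

lemma bbs_step_eq_aGo (config : List Int) : bbs_step config = aGo config 0 := by
  have := aGo_inv config config [] [] 0 rfl rfl
  simpa [bbs_step] using this

lemma skipAux_le (rest : List Int) : ∀ k, skipAux rest k ≤ rest.length := by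
  induction rest with
  | nil => intro k; simp [skipAux]
  | cons v xs ih =>
    intro k
    match k with
    | 0 =>
      by_cases hv : v = 1
      · simp [skipAux, hv]; exact ih 0
      · simp [skipAux, hv]
    | k + 1 => simp [skipAux]; exact ih k

lemma skipBalls_shift (rest : List Int) :
    ∀ (pre : List Int) (k : Nat), k ≤ rest.length →
      skipBalls (pre ++ rest) (pre.length + k) = pre.length + skipAux rest k := by
  induction rest with
  | nil =>
    intro pre k hk
    have hk0 : k = 0 := by simpa using hk
    subst hk0
    rw [skipBalls]
    simp [skipAux]
  | cons v xs ih =>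
    intro pre k hk
    match k with
    | 0 =>
      rw [skipBalls]
      have hlt : pre.length + 0 < (pre ++ v :: xs).length := by simp
      have hget : (pre ++ v :: xs).getD (pre.length + 0) 0 = v := by
        simp [List.getD]
      rw [dif_pos hlt, hget]
      by_cases hv : v = 1
      · rw [if_pos hv]
        have := ih (pre ++ [v]) 0 (by simp)
        simp only [List.append_assoc, List.singleton_append, List.length_append,
          List.length_singleton] at this ⊢
        rw [show pre.length + 0 + 1 = pre.length + 1 + 0 by omega, this]
        simp [skipAux, hv]; omega
      · rw [if_neg hv]; simp [skipAux, hv]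
    | k + 1 =>
      have := ih (pre ++ [v]) k (by simpa using hk)
      simp only [List.append_assoc, List.singleton_append, List.length_append,
        List.length_singleton] at this
      rw [show pre.length + (k + 1) = pre.length + 1 + k by omega, this]
      simp [skipAux]; omega

lemma winArr_zero (rest : List Int) : winArr rest 0 = List.replicate rest.length 0 := by
  simp [winArr]

lemma winArr_cons (v : Int) (rest : List Int) (d : Nat) :
    winArr (v :: rest) d
      = (if 0 < d then (if v = 1 then (0 : Int) else 1) else 0) :: winArr rest (d - 1) := by
  match d with
  | 0 => simp [winArr, List.replicate_succ]
  | d + 1 => simp [winArr]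

lemma winArr_set (rest : List Int) :
    ∀ k, skipAux rest k < rest.length →
      (winArr rest k).set (skipAux rest k) 1 = winArr rest (skipAux rest k + 1) := by
  induction rest with
  | nil => intro k h; simp [skipAux] at h
  | cons v xs ih =>
    intro k h
    match k with
    | 0 =>
      by_cases hv : v = 1
      · have hs : skipAux (v :: xs) 0 = skipAux xs 0 + 1 := by simp [skipAux, hv]
        rw [hs]
        rw [winArr_cons, winArr_cons]
        simp only [List.set_cons_succ]
        rw [ih 0 (by rw [hs] at h; simpa using h)]
        simp [hv]
      · have hs : skipAux (v :: xs) 0 = 0 := by simp [skipAux, hv]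
        rw [hs, winArr_cons, winArr_cons]
        simp [hv]
    | k + 1 =>
      have hs : skipAux (v :: xs) (k + 1) = skipAux xs k + 1 := by simp [skipAux]
      rw [hs, winArr_cons, winArr_cons]
      simp only [Nat.add_sub_cancel, List.set_cons_succ]
      rw [ih k (by rw [hs] at h; simpa using h)]
      simp

lemma winArr_full (rest : List Int) :
    ∀ k, skipAux rest k = rest.length → winArr rest k = winArr rest rest.length := by
  induction rest with
  | nil => intro k _; simp [winArr]
  | cons v xs ih =>
    intro k h
    match k with
    | 0 =>
      by_cases hv : v = 1
      · have hs : skipAux (v :: xs) 0 = skipAux xs 0 + 1 := by simp [skipAux, hv]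
        rw [hs] at h
        have hx : skipAux xs 0 = xs.length := by simpa using h
        rw [winArr_cons, winArr_cons]
        simp only [Nat.add_sub_cancel, List.length_cons]
        rw [ih 0 hx]
        simp [hv]
      · have hs : skipAux (v :: xs) 0 = 0 := by simp [skipAux, hv]
        rw [hs] at h
        simp at h
    | k + 1 =>
      have hs : skipAux (v :: xs) (k + 1) = skipAux xs k + 1 := by simp [skipAux]
      rw [hs] at h
      have hx : skipAux xs k = xs.length := by simpa using h
      rw [winArr_cons, winArr_cons]
      simp only [Nat.add_sub_cancel, List.length_cons]
      rw [ih k hx]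
      simp

/-- Invariant for B's loop: state = decided prefix ++ window, pointer j tracked. -/
lemma bGo_inv (config : List Int) :
    ∀ (rest pre done : List Int) (j : Nat),
      config = pre ++ rest → done.length = pre.length → j ≤ config.length →
      ((List.range' pre.length rest.length 1).foldl
        (fun (st : List Int × Nat) (i : Nat) =>
          if config.getD i 0 = 1 then
            let j' := max st.2 (i + 1)
            let j' := skipBalls config j'
            if j' < config.length then (st.1.set j' 1, j' + 1) else (st.1, j')
          else st)
        (done ++ winArr rest (j - pre.length), j)).1
      = done ++ bGo rest (j - pre.length) := by
  intro rest
  induction rest with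
  | nil =>
    intro pre done j hcfg hlen hj
    simp [bGo, winArr]
  | cons v xs ih =>
    intro pre done j hcfg hlen hj
    have hget : config.getD pre.length 0 = v := by
      subst hcfg; simp [List.getD]
    rw [List.length_cons, List.range'_succ, List.foldl_cons, hget]
    set d : Nat := j - pre.length with hd
    by_cases hv : v = 1
    · -- ball: place via skipBalls
      rw [if_pos hv]
      have hmax : max j (pre.length + 1) = (pre.length + 1) + (d - 1) := by omega
      have hk : d - 1 ≤ xs.length := by
        have : j ≤ pre.length + 1 + xs.length := by
          subst hcfg; simp at hj; omega
        omega
      have hskip :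
          skipBalls config (max j (pre.length + 1)) = (pre.length + 1) + skipAux xs (d - 1) := by
        rw [hmax]
        have := skipBalls_shift xs (pre ++ [v]) (d - 1) hk
        simpa [hcfg, List.append_assoc] using this
      set e : Nat := skipAux xs (d - 1) with he
      have hwin : done ++ winArr (v :: xs) d = (done ++ [0]) ++ winArr xs (d - 1) := by
        rw [winArr_cons]
        simp [hv]
      by_cases hlt : e < xs.length
      · have hjlt : (pre.length + 1) + e < config.length := by
          subst hcfg; simp; omega
        simp only [hskip, if_pos hjlt]
        have hws := winArr_set xs (d - 1) (by rw [← he]; exact hlt)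
        rw [← he] at hws
        have hset : (done ++ winArr (v :: xs) d).set ((pre.length + 1) + e) 1
            = (done ++ [0]) ++ winArr xs (e + 1) := by
          rw [hwin, List.set_append,
            if_neg (by simp only [List.length_append, List.length_singleton, hlen]; omega),
            show (pre.length + 1) + e - ((done ++ [0] : List Int)).length = e by
              simp only [List.length_append, List.length_singleton, hlen]; omega,
            hws]
        rw [hset]
        have := ih (pre ++ [v]) (done ++ [0]) ((pre.length + 1) + e + 1)
          (by simp [hcfg]) (by simp [hlen])
          (by subst hcfg; simp; omega)
        simp only [List.length_append, List.length_singleton] at this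
        rw [show (pre.length + 1) + e + 1 - (pre.length + 1) = e + 1 by omega] at this
        rw [this]
        simp [bGo, hv, ← he, if_pos hlt]
      · have hfull : e = xs.length := by
          have := skipAux_le xs (d - 1); rw [← he] at this; omega
        have hjge : ¬ ((pre.length + 1) + e < config.length) := by
          subst hcfg; simp; omega
        simp only [hskip, if_neg hjge]
        rw [hwin, winArr_full xs (d - 1) (by rw [← he]; exact hfull)]
        have := ih (pre ++ [v]) (done ++ [0]) ((pre.length + 1) + e)
          (by simp [hcfg]) (by simp [hlen])
          (by subst hcfg; simp; omega)
        simp only [List.length_append, List.length_singleton] at this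
        rw [show (pre.length + 1) + e - (pre.length + 1) = e by omega] at this
        rw [hfull] at this ⊢
        rw [this]
        simp [bGo, hv, ← he, hfull]
    · -- box: nothing happens
      rw [if_neg hv]
      have hwin : done ++ winArr (v :: xs) d
          = (done ++ [if 0 < d then (1 : Int) else 0]) ++ winArr xs (d - 1) := by
        rw [winArr_cons]
        by_cases hd : 0 < d <;> simp [hv, hd]
      rw [hwin]
      have := ih (pre ++ [v]) (done ++ [if 0 < d then (1 : Int) else 0]) j
        (by simp [hcfg]) (by simp [hlen]) hj
      simp only [List.length_append, List.length_singleton] at this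
      rw [show j - (pre.length + 1) = d - 1 by omega] at this
      rw [this]
      simp [bGo, hv]

lemma bbs_step_alt_eq_bGo (config : List Int) : bbs_step_alt config = bGo config 0 := by
  have := bGo_inv config config [] [] 0 rfl rfl (by omega)
  simpa [bbs_step_alt, List.range_eq_range', winArr_zero] using this

lemma cbN_take_skip (rest : List Int) :
    ∀ k, cbN (rest.take (let e := skipAux rest k; if e < rest.length then e + 1 else e))
      = min (cbN (rest.take k) + 1) (cbN rest) := by
  induction rest with
  | nil => intro k; simp [skipAux, cbN]
  | cons v xs ih =>
    intro k
    match k with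
    | 0 =>
      by_cases hv : v = 1
      · have hs : skipAux (v :: xs) 0 = skipAux xs 0 + 1 := by simp [skipAux, hv]
        have hcv : cbN (v :: xs) = cbN xs := by simp [cbN, hv]
        have hcond : (skipAux (v :: xs) 0 < (v :: xs).length) ↔ (skipAux xs 0 < xs.length) := by
          rw [hs]; simp
        simp only [hs]
        by_cases hlt : skipAux xs 0 < xs.length
        · rw [if_pos (by simp only [List.length_cons]; omega)]
          have := ih 0
          rw [if_pos hlt] at this
          simp only [List.take_succ_cons]
          have hh : cbN (v :: xs.take (skipAux xs 0 + 1)) = cbN (xs.take (skipAux xs 0 + 1)) := by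
            simp [cbN, hv]
          rw [hh, this]
          simp [cbN, hv]
        · rw [if_neg (by simp only [List.length_cons]; omega)]
          have := ih 0
          rw [if_neg hlt] at this
          simp only [List.take_succ_cons]
          have hh : cbN (v :: xs.take (skipAux xs 0)) = cbN (xs.take (skipAux xs 0)) := by
            simp [cbN, hv]
          rw [hh, this]
          simp [cbN, hv]
      · have hs : skipAux (v :: xs) 0 = 0 := by simp [skipAux, hv]
        simp only [hs]
        rw [if_pos (by simp)]
        simp [cbN, hv]
    | k + 1 =>
      have hs : skipAux (v :: xs) (k + 1) = skipAux xs k + 1 := by simp [skipAux]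
      simp only [hs]
      have hcond : skipAux xs k + 1 < (v :: xs).length ↔ skipAux xs k < xs.length := by simp
      by_cases hlt : skipAux xs k < xs.length
      · rw [if_pos (hcond.mpr hlt)]
        have := ih k
        rw [if_pos hlt] at this
        simp only [List.take_succ_cons, cbN, List.countP_cons] at this ⊢
        omega
      · rw [if_neg (fun h => hlt (hcond.mp h))]
        have := ih k
        rw [if_neg hlt] at this
        simp only [List.take_succ_cons, cbN, List.countP_cons] at this ⊢
        omega

/-- Core: carrier value c and window width d correspond through box counts. -/
lemma aGo_eq_bGo : ∀ (rest : List Int) (c : Int) (d : Nat), 0 ≤ c →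
    (cbN (rest.take d) : Int) = min c (cbN rest) → aGo rest c = bGo rest d := by
  intro rest
  induction rest with
  | nil => intro c d _ _; simp [aGo, bGo]
  | cons v xs ih =>
    intro c d hc hinv
    by_cases hv : v = 1
    · have hcb : cbN (v :: xs) = cbN xs := by simp [cbN, hv]
      have hkey : (cbN (xs.take (d - 1)) : Int) = min c (cbN xs) := by
        match d with
        | 0 =>
          rw [hcb] at hinv
          simpa [cbN] using hinv
        | d + 1 =>
          simp only [List.take_succ_cons] at hinv
          have : cbN (v :: xs.take d) = cbN (xs.take d) := by simp [cbN, hv]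
          rw [this] at hinv
          simpa [hcb] using hinv
      have hnext : (cbN (xs.take (let e := skipAux xs (d - 1);
          if e < xs.length then e + 1 else e)) : Int) = min (c + 1) (cbN xs) := by
        rw [cbN_take_skip xs (d - 1)]
        have h1 : cbN (xs.take (d - 1)) ≤ cbN xs :=
          List.Sublist.countP_le (List.take_sublist _ _)
        push_cast
        omega
      simp only [aGo, bGo, if_pos hv]
      rw [ih (c + 1) _ (by omega) hnext]
    · have hcb : cbN (v :: xs) = cbN xs + 1 := by simp [cbN, hv]
      have hiff : c > 0 ↔ 0 < d := by
        constructor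
        · intro h
          by_contra hd
          have hd0 : d = 0 := by omega
          rw [hd0] at hinv
          rw [hcb] at hinv
          simp [cbN] at hinv
          omega
        · intro h
          match d, h with
          | d + 1, _ =>
            simp only [List.take_succ_cons] at hinv
            have : cbN (v :: xs.take d) = cbN (xs.take d) + 1 := by simp [cbN, hv]
            rw [this] at hinv
            push_cast at hinv
            omega
      by_cases hcpos : c > 0
      · have hd : 0 < d := hiff.mp hcpos
        have hkey : (cbN (xs.take (d - 1)) : Int) = min (c - 1) (cbN xs) := by
          match d, hd with
          | d + 1, _ =>
            simp only [List.take_succ_cons] at hinv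
            have : cbN (v :: xs.take d) = cbN (xs.take d) + 1 := by simp [cbN, hv]
            rw [this] at hinv
            rw [hcb] at hinv
            push_cast at hinv ⊢
            omega
        simp only [aGo, bGo, if_neg hv, if_pos hcpos, if_pos hd]
        rw [ih (c - 1) (d - 1) (by omega) hkey]
      · have hd : ¬ 0 < d := fun h => hcpos (hiff.mpr h)
        have hc0 : c = 0 := by omega
        have hd0 : d = 0 := by omega
        have hkey : (cbN (xs.take (0 - 1 : Nat)) : Int) = min c (cbN xs) := by
          simp [hc0, cbN]
        simp only [aGo, bGo, if_neg hv, if_neg hcpos, if_neg hd]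
        rw [hd0, ih c (0 - 1 : Nat) hc (by simpa using hkey)]

-- ===== VERDICT (by name: the statement is the Claim_ definition above) =====
theorem bbs_step_spec : Claim_equal_bbs_step := by
  intro config _
  unfold Spec_bbs_step
  rw [bbs_step_eq_aGo, bbs_step_alt_eq_bGo]
  exact aGo_eq_bGo config 0 0 (le_refl 0) (by simp [cbN])
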